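-- pv_equiv track=rewrite | github.com/0xThoughtVector/grocery_order_checker | production_app/utils.py | compare_order
-- ===== SOURCE A (Python) =====
-- from typing import Dict, Tuple
--
-- def compare_order(recognized: Dict[str, int], required: Dict[str, int]) -> Tuple[Dict[str, int], Dict[str, int]]:
--     """
--     Compare recognized items vs. required (order) items.
--     Returns:
--        missing_dict: {item: quantity_missing}
--        extra_dict:   {item: quantity_extra}
--     If an item is recognized but not in required, it's extra.
--     If an item in required is not recognized or recognized in fewer quantity, it's missing.
--     """
--     missing_dict = {}
--     extra_dict = {}
--
--     # 1. Check for missing or partial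
--     for req_item, req_qty in required.items():
--         rec_qty = recognized.get(req_item, 0)
--         if rec_qty < req_qty:
--             missing_dict[req_item] = req_qty - rec_qty
--
--     # 2. Check for extra
--     for rec_item, rec_qty in recognized.items():
--         req_qty = required.get(rec_item, 0)
--         if rec_qty > req_qty:
--             extra_dict[rec_item] = rec_qty - req_qty
--
--     return missing_dict, extra_dict
-- ===== SOURCE B (Python) =====
-- from typing import Dict, Tuple
--
-- def compare_order(recognized: Dict[str, int], required: Dict[str, int]) -> Tuple[Dict[str, int], Dict[str, int]]:
--     # Build one signed surplus table over the union of keys: delta[k] = recognized qty - required qty.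
--     delta = {}
--     for item, qty in required.items():
--         delta[item] = -qty
--     for item, qty in recognized.items():
--         delta[item] = delta.get(item, 0) + qty
--     # Project the table by sign: negative surplus -> missing, positive surplus -> extra.
--     missing_dict = {item: -delta[item] for item in required if delta[item] < 0}
--     extra_dict = {item: delta[item] for item in recognized if delta[item] > 0}
--     return missing_dict, extra_dict
-- ===== Notes on version B (the rewrite author's own statement) =====
-- stated objective: alternative
-- what changed: Instead of A's two independent compare-and-collect loops each doing get-lookups into the other dict, B first merges both dicts into one signed surplus table delta[k] = recognized - required, then derives missing and extra purely by the sign of that precomputed table, so the cross-dict lookups disappear from the collecting passes.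
import Mathlib
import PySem

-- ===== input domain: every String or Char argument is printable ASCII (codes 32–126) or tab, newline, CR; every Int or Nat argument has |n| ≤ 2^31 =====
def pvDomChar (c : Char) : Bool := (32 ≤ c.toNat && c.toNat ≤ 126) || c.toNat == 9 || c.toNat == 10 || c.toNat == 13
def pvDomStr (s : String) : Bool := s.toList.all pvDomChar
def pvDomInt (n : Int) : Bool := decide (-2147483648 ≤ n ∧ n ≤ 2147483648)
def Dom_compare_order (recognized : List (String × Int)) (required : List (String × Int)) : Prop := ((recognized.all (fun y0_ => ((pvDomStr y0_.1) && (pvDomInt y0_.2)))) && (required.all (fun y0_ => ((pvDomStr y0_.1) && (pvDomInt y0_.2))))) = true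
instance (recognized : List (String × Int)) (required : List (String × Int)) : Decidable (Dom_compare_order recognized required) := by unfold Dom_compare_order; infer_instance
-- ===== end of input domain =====

-- B replaces A's two cross-looking compare loops by one merged signed-surplus table
-- (delta = recognized - required) projected by sign (objective: alternative).


-- ===== PORT A =====
def compare_order (recognized : List (String × Int)) (required : List (String × Int)) : (List (String × Int)) × (List (String × Int)) :=
  let missing_dict := required.foldl (fun m (p : String × Int) =>
      let rec_qty := (PySem.Dict.mk recognized).getD p.1 0
      if rec_qty < p.2 then m.insert p.1 (p.2 - rec_qty) else m) (PySem.Dict.empty : PySem.Dict String Int)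
  let extra_dict := recognized.foldl (fun e (p : String × Int) =>
      let req_qty := (PySem.Dict.mk required).getD p.1 0
      if p.2 > req_qty then e.insert p.1 (p.2 - req_qty) else e) (PySem.Dict.empty : PySem.Dict String Int)
  (missing_dict.items, extra_dict.items)

-- ===== PORT B =====
def compare_order_alt (recognized : List (String × Int)) (required : List (String × Int)) : (List (String × Int)) × (List (String × Int)) :=
  -- delta = {}; for item, qty in required: delta[item] = -qty; for item, qty in recognized: delta[item] = delta.get(item,0)+qty
  let delta0 := required.foldl (fun d (p : String × Int) => d.insert p.1 (-p.2)) (PySem.Dict.empty : PySem.Dict String Int)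
  let delta := recognized.foldl (fun d (p : String × Int) => d.insert p.1 (d.getD p.1 0 + p.2)) delta0
  -- {item: -delta[item] for item in required if delta[item] < 0}
  let missing_dict := required.foldl (fun m (p : String × Int) =>
      if delta.getD p.1 0 < 0 then m.insert p.1 (-(delta.getD p.1 0)) else m) (PySem.Dict.empty : PySem.Dict String Int)
  -- {item: delta[item] for item in recognized if delta[item] > 0}
  let extra_dict := recognized.foldl (fun e (p : String × Int) =>
      if delta.getD p.1 0 > 0 then e.insert p.1 (delta.getD p.1 0) else e) (PySem.Dict.empty : PySem.Dict String Int)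
  (missing_dict.items, extra_dict.items)

-- ===== PRECONDITION & SPEC =====
-- Pre_ restricts each association list to distinct keys: a Python dict can never carry a
-- duplicate key, so this excludes no input the Python programs are ever called on.
def Pre_compare_order (recognized : List (String × Int)) (required : List (String × Int)) : Prop :=
  (recognized.map Prod.fst).Nodup ∧ (required.map Prod.fst).Nodup
instance (recognized : List (String × Int)) (required : List (String × Int)) : Decidable (Pre_compare_order recognized required) := by unfold Pre_compare_order; infer_instance

def pvWitness_compare_order : (List (String × Int)) × (List (String × Int)) :=
  ([("apple", 2), ("milk", 1)], [("apple", 3), ("bread", 1)])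

def Spec_compare_order (recognized : List (String × Int)) (required : List (String × Int)) (out : (List (String × Int)) × (List (String × Int))) : Prop := out = compare_order_alt recognized required
instance (recognized : List (String × Int)) (required : List (String × Int)) (out : (List (String × Int)) × (List (String × Int))) : Decidable (Spec_compare_order recognized required out) := by unfold Spec_compare_order; infer_instance

-- ===== CLAIM (what is proved, stated in full; the proofs are below) =====
def Claim_equal_compare_order : Prop := ∀ (recognized : List (String × Int)) (required : List (String × Int)), Dom_compare_order recognized required → Pre_compare_order recognized required → Spec_compare_order recognized required (compare_order recognized required)

-- ===== LEMMAS AND PROOFS =====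

-- First delta loop: after 'for item, qty in required: delta[item] = -qty',
-- delta[k] is -required[k] where present, else the starting value.
lemma negFold_getD (l : List (String × Int)) (d0 : PySem.Dict String Int)
    (hnd : (l.map Prod.fst).Nodup) (k : String) :
    (l.foldl (fun d (p : String × Int) => d.insert p.1 (-p.2)) d0).getD k 0
      = match (PySem.Dict.mk l).get? k with
        | some v => -v
        | none => d0.getD k 0 := by
  induction l generalizing d0 with
  | nil => simp [PySem.Dict.get?]
  | cons a t ih =>
      obtain ⟨ak, av⟩ := a
      simp only [List.map_cons, List.nodup_cons] at hnd
      rw [List.foldl_cons, ih _ hnd.2, PySem.Dict.get?_mk_cons]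
      by_cases hk : ak = k
      · subst hk
        have hnone : (PySem.Dict.mk t).get? ak = none := by
          rw [PySem.Dict.get?_eq_none_iff_not_mem_keys]
          simpa [PySem.Dict.keys] using hnd.1
        simp [hnone]
      · cases h : (PySem.Dict.mk t).get? k <;>
          simp [hk, PySem.Dict.getD_insert, Ne.symm hk]

-- Second delta loop: 'for item, qty in recognized: delta[item] = delta.get(item,0)+qty'
-- adds recognized[k] (0 where absent) to each entry.
lemma addFold_getD (l : List (String × Int)) (d0 : PySem.Dict String Int)
    (hnd : (l.map Prod.fst).Nodup) (k : String) :
    (l.foldl (fun d (p : String × Int) => d.insert p.1 (d.getD p.1 0 + p.2)) d0).getD k 0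
      = d0.getD k 0 + (PySem.Dict.mk l).getD k 0 := by
  induction l generalizing d0 with
  | nil => simp [PySem.Dict.getD, PySem.Dict.get?]
  | cons a t ih =>
      obtain ⟨ak, av⟩ := a
      simp only [List.map_cons, List.nodup_cons] at hnd
      rw [List.foldl_cons, ih _ hnd.2,
        PySem.Dict.getD_eq_get?_getD (d := PySem.Dict.mk ((ak, av) :: t)), PySem.Dict.get?_mk_cons]
      by_cases hk : ak = k
      · subst hk
        have hnone : (PySem.Dict.mk t).get? ak = none := by
          rw [PySem.Dict.get?_eq_none_iff_not_mem_keys]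
          simpa [PySem.Dict.keys] using hnd.1
        rw [PySem.Dict.getD_eq_get?_getD (d := PySem.Dict.mk t), hnone]
        simp
      · simp only [beq_iff_eq, if_neg hk]
        rw [← PySem.Dict.getD_eq_get?_getD]
        simp [PySem.Dict.getD_insert, Ne.symm hk]

-- The merged table computes exactly the signed surplus recognized - required at every key.
lemma delta_getD (recognized required : List (String × Int))
    (hrec : (recognized.map Prod.fst).Nodup) (hreq : (required.map Prod.fst).Nodup) (k : String) :
    ((recognized.foldl (fun d (p : String × Int) => d.insert p.1 (d.getD p.1 0 + p.2))
        (required.foldl (fun d (p : String × Int) => d.insert p.1 (-p.2)) (PySem.Dict.empty : PySem.Dict String Int))).getD k 0)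
      = (PySem.Dict.mk recognized).getD k 0 - (PySem.Dict.mk required).getD k 0 := by
  rw [addFold_getD _ _ hrec, negFold_getD _ _ hreq]
  rw [PySem.Dict.getD_eq_get?_getD (d := PySem.Dict.mk required)]
  cases (PySem.Dict.mk required).get? k <;> simp [PySem.Dict.getD_empty] <;> try ring

-- A member's own value is what the dict lookup returns (distinct keys).
lemma getD_self_of_mem (l : List (String × Int)) (hnd : (l.map Prod.fst).Nodup)
    (p : String × Int) (hp : p ∈ l) :
    (PySem.Dict.mk l).getD p.1 0 = p.2 := by
  exact PySem.Dict.getD_of_mem_items (d := PySem.Dict.mk l) (by simpa using hp)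
    (by simpa [PySem.Dict.keys] using hnd) 0

-- ===== VERDICT (by name: the statement is the Claim_ definition above) =====
theorem compare_order_spec : Claim_equal_compare_order := by
  intro recognized required _ hpre
  obtain ⟨hrec, hreq⟩ := hpre
  show _ = _
  simp only [compare_order, compare_order_alt]
  refine Prod.ext ?_ ?_ <;> simp only
  · congr 1
    apply PySem.List.foldl_congr_mem'
    intro p hp acc
    rw [delta_getD _ _ hrec hreq, getD_self_of_mem _ hreq _ hp]
    rcases lt_or_ge ((PySem.Dict.mk recognized).getD p.1 0) p.2 with h | h
    · rw [if_pos h, if_pos (by omega)]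
      congr 1; ring
    · rw [if_neg (by omega), if_neg (by omega)]
  · congr 1
    apply PySem.List.foldl_congr_mem'
    intro p hp acc
    rw [delta_getD _ _ hrec hreq, getD_self_of_mem _ hrec _ hp]
    rcases lt_or_ge ((PySem.Dict.mk required).getD p.1 0) p.2 with h | h
    · rw [if_pos (by omega : p.2 - (PySem.Dict.mk required).getD p.1 0 > 0), if_pos h]
    · rw [if_neg (by omega), if_neg (by omega)]
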